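-- pv_equiv track=rewrite | github.com/python-coding-test/cote0505 | 11주차/6번문제/정광석.py | iscorr
-- ===== SOURCE A (Python) =====
-- def iscorr(p):
--     value = 0
--
--     for w in p:
--         if w == '(':
--             value += 1
--         else:
--             value -= 1
--         if value < 0:
--             return False
--
--     return True
-- ===== SOURCE B (Python) =====
-- def iscorr(p):
--     # Divide and conquer: for a segment compute (total balance, minimum prefix balance
--     # including the empty prefix); combine halves with min(mL, tL + mR).
--     def scan(lo, hi):
--         if hi - lo == 0:
--             return (0, 0)
--         if hi - lo == 1:
--             d = 1 if p[lo] == '(' else -1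
--             return (d, min(d, 0))
--         mid = (lo + hi) // 2
--         tL, mL = scan(lo, mid)
--         tR, mR = scan(mid, hi)
--         return (tL + tR, min(mL, tL + mR))
--     return scan(0, len(p))[1] >= 0
-- ===== Notes on version B (the rewrite author's own statement) =====
-- stated objective: alternative
-- what changed: B replaces A's guarded left-to-right scan with a divide-and-conquer over string halves, computing for each segment the pair (total balance, minimum prefix balance) and merging pairs monoid-style; the answer is whether the global minimum prefix balance is nonnegative.
import Mathlib
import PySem

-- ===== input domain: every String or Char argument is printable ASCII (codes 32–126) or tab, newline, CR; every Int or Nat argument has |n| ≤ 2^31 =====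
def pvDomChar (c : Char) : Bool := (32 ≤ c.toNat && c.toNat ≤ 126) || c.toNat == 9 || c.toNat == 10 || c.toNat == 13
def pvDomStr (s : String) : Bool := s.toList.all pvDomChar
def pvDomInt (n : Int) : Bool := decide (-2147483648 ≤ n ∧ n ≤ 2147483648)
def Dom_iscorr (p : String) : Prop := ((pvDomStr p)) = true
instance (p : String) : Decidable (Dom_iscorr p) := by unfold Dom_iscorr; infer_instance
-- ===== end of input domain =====

-- B replaces A's guarded linear scan by a divide-and-conquer over string halves,
-- combining per-segment pairs (total balance, min prefix balance); same result, similar cost.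

-- ===== PORT A =====
-- the for-loop with early 'return False', as structural recursion on the characters
def iscorrLoop (cs : List Char) (value : Int) : Bool :=
  match cs with
  | [] => true
  | w :: ws =>
      let value' := if w = '(' then value + 1 else value - 1
      if value' < 0 then false else iscorrLoop ws value'

def iscorr (p : String) : Bool := iscorrLoop p.toList 0

-- ===== PORT B =====
-- 'scan(lo, hi)' of Source B: divide-and-conquer on the segment (here the sublist itself),
-- returning (total balance, minimum prefix balance incl. the empty prefix)
def iscorrScan (cs : List Char) : Int × Int :=
  match cs with
  | [] => (0, 0)
  | [c] =>
      let d : Int := if c = '(' then 1 else -1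
      (d, min d 0)
  | c1 :: c2 :: rest =>
      let n := (c1 :: c2 :: rest).length / 2
      let L := iscorrScan ((c1 :: c2 :: rest).take n)
      let R := iscorrScan ((c1 :: c2 :: rest).drop n)
      (L.1 + R.1, min L.2 (L.1 + R.2))
termination_by cs.length
decreasing_by
  · simp [List.length_take]; omega
  · simp [List.length_drop]; omega

-- 'return scan(0, len(p))[1] >= 0'
def iscorr_alt (p : String) : Bool := decide (0 ≤ (iscorrScan p.toList).2)

-- ===== PRECONDITION & SPEC =====
def Spec_iscorr (p : String) (out : Bool) : Prop := out = iscorr_alt p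
instance (p : String) (out : Bool) : Decidable (Spec_iscorr p out) := by unfold Spec_iscorr; infer_instance

-- ===== CLAIM (what is proved, stated in full; the proofs are below) =====
def Claim_equal_iscorr : Prop := ∀ (p : String), Dom_iscorr p → Spec_iscorr p (iscorr p)

-- ===== LEMMAS AND PROOFS =====

-- specification functions: total balance and min prefix balance (incl. empty prefix)
def balS : List Char → Int
  | [] => 0
  | c :: t => (if c = '(' then 1 else -1) + balS t

def mnS : List Char → Int
  | [] => 0
  | c :: t => min ((if c = '(' then 1 else -1) + mnS t) 0

theorem mnS_nonpos (cs : List Char) : mnS cs ≤ 0 := by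
  cases cs with
  | nil => simp [mnS]
  | cons c t => simp only [mnS]; omega

theorem balS_append (L R : List Char) : balS (L ++ R) = balS L + balS R := by
  induction L with
  | nil => simp [balS]
  | cons c t ih => simp [balS, ih]; ring

theorem mnS_append (L R : List Char) : mnS (L ++ R) = min (mnS L) (balS L + mnS R) := by
  induction L with
  | nil => have := mnS_nonpos R; simp [mnS, balS]; omega
  | cons c t ih => simp [mnS, balS, ih]; omega

theorem iscorrScan_eq (cs : List Char) : iscorrScan cs = (balS cs, mnS cs) := by
  fun_induction iscorrScan cs with
  | case1 => simp [balS, mnS]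
  | case2 c => simp only [balS, mnS, add_zero]; rfl
  | case3 c1 c2 rest n L R ihT ihD =>
      have h := balS_append ((c1 :: c2 :: rest).take n) ((c1 :: c2 :: rest).drop n)
      have h2 := mnS_append ((c1 :: c2 :: rest).take n) ((c1 :: c2 :: rest).drop n)
      rw [List.take_append_drop] at h h2
      simp only [L, R, ihT, ihD]
      simp [h, h2]

theorem loop_iff_mnS (cs : List Char) (v : Int) (hv : 0 ≤ v) :
    iscorrLoop cs v = true ↔ 0 ≤ v + mnS cs := by
  induction cs generalizing v with
  | nil => simp [iscorrLoop, mnS]; omega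
  | cons c t ih =>
      have hv' : (if c = '(' then v + 1 else v - 1) = v + (if c = '(' then (1:Int) else -1) := by
        split <;> ring
      simp only [iscorrLoop, hv', mnS]
      by_cases h : v + (if c = '(' then (1:Int) else -1) < 0
      · have := mnS_nonpos t
        simp only [if_pos h]
        constructor
        · intro hf; cases hf
        · intro hle; omega
      · simp only [if_neg h]
        rw [ih _ (by omega)]
        omega

-- ===== VERDICT (by name: the statement is the Claim_ definition above) =====
theorem iscorr_spec : Claim_equal_iscorr := by
  intro p _
  unfold Spec_iscorr iscorr iscorr_alt
  rw [iscorrScan_eq]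
  rcases h : iscorrLoop p.toList 0 with hf | ht
  · have : ¬ (0 ≤ (0:Int) + mnS p.toList) := by
      intro hle
      have := (loop_iff_mnS p.toList 0 le_rfl).mpr hle
      rw [h] at this; cases this
    simp at this ⊢
    omega
  · have := (loop_iff_mnS p.toList 0 le_rfl).mp h
    simp at this ⊢
    omega
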